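-- pv_equiv track=rewrite | github.com/morisanyutakun-png/Latex_gui | backend/app/rubric_parser.py | _unquote
-- ===== SOURCE A (Python) =====
-- def _unquote(value: str) -> str:
--     """ダブル/シングルクォートを外してバックスラッシュエスケープを解除する"""
--     v = value.strip()
--     if len(v) >= 2 and v[0] == v[-1] and v[0] in ('"', "'"):
--         inner = v[1:-1]
--         # \" → "  /  \\ → \  /  \n は改行
--         out = []
--         i = 0
--         while i < len(inner):
--             ch = inner[i]
--             if ch == "\\" and i + 1 < len(inner):
--                 nxt = inner[i + 1]
--                 if nxt == "n":
--                     out.append("\n")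
--                 else:
--                     out.append(nxt)
--                 i += 2
--             else:
--                 out.append(ch)
--                 i += 1
--         return "".join(out)
--     return v
-- ===== SOURCE B (Python) =====
-- def _unquote(value: str) -> str:
--     v = value.strip()
--     if len(v) >= 2 and v[0] == v[-1] and v[0] in ('"', "'"):
--         # Split the inner text on backslashes: each later segment's first
--         # character is the escaped character (empty segment = escaped
--         # backslash, consuming the following segment literally; a final
--         # empty segment = lone trailing backslash, kept).
--         parts = v[1:-1].split('\\')
--         res = [parts[0]]
--         i = 1
--         while i < len(parts):
--             p = parts[i]
--             if p:
--                 res.append('\n' if p[0] == 'n' else p[0])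
--                 res.append(p[1:])
--                 i += 1
--             elif i + 1 < len(parts):
--                 res.append('\\')
--                 res.append(parts[i + 1])
--                 i += 2
--             else:
--                 res.append('\\')
--                 i += 1
--         return ''.join(res)
--     return v
-- ===== Notes on version B (the rewrite author's own statement) =====
-- stated objective: alternative
-- what changed: A walks the inner string character by character with manual i+=1/i+=2 index arithmetic; B first splits the inner text into backslash-delimited segments with str.split and then decodes per segment (the first char of each later segment is the escaped char, empty segments encode escaped or trailing backslashes), joining at the end.
import Mathlib
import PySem

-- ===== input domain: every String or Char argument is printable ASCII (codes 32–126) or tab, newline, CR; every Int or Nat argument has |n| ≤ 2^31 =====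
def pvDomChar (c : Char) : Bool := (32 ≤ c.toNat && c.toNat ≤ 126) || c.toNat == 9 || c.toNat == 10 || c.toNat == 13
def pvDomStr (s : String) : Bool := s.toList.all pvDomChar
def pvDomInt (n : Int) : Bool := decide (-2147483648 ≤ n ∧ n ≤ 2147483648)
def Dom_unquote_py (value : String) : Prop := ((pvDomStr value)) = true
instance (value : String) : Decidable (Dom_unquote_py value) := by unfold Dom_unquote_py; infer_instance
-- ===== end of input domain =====

-- B replaces A's char-by-char index walk by split-on-backslash followed by per-segment decoding; same cost, alternative algorithm.

-- ===== PORT A =====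
-- the while loop of A: index i, accumulator out, i+=2 on an escape pair, i+=1 otherwise
def unquoteLoopA (inner : List Char) (i : Nat) (out : List Char) : List Char :=
  if h : i < inner.length then
    let ch := inner[i]
    if h2 : ch = '\\' ∧ i + 1 < inner.length then
      let nxt := inner[i + 1]
      unquoteLoopA inner (i + 2) (out ++ [if nxt = 'n' then '\n' else nxt])
    else
      unquoteLoopA inner (i + 1) (out ++ [ch])
  else out
termination_by inner.length - i

def unquote_py (value : String) : String :=
  let v := PySem.Chars.strip value.toList
  if 2 ≤ v.length ∧ PySem.List.pyGet? v 0 = PySem.List.pyGet? v (-1) ∧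
      (PySem.List.pyGet? v 0 = some '"' ∨ PySem.List.pyGet? v 0 = some '\'') then
    String.ofList (unquoteLoopA (PySem.List.slice v (some 1) (some (-1))) 0 [])
  else String.ofList v

-- ===== PORT B =====
-- B's while loop over the segment list parts (i starts at 1, res starts as [parts[0]]):
-- a nonempty segment contributes its decoded first char plus its tail (i += 1);
-- an empty non-final segment is an escaped backslash consuming the next segment
-- literally (i += 2); a final empty segment is a kept trailing backslash.
def unquoteLoopB (parts : List (List Char)) (i : Nat) (res : List (List Char)) :
    List (List Char) :=
  if h : i < parts.length then
    match parts[i] with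
    | c :: cs => unquoteLoopB parts (i + 1) (res ++ [[if c = 'n' then '\n' else c], cs])
    | [] =>
      if h2 : i + 1 < parts.length then
        unquoteLoopB parts (i + 2) (res ++ [['\\'], parts[i + 1]])
      else
        unquoteLoopB parts (i + 1) (res ++ [['\\']])
  else res
termination_by parts.length - i

def unquote_py_alt (value : String) : String :=
  let v := PySem.Chars.strip value.toList
  if 2 ≤ v.length ∧ PySem.List.pyGet? v 0 = PySem.List.pyGet? v (-1) ∧
      (PySem.List.pyGet? v 0 = some '"' ∨ PySem.List.pyGet? v 0 = some '\'') then
    let parts := PySem.Chars.splitOn (PySem.List.slice v (some 1) (some (-1))) ['\\']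
    String.ofList (unquoteLoopB parts 1 [parts.headI]).flatten
  else String.ofList v

-- ===== PRECONDITION & SPEC =====
def Spec_unquote_py (value : String) (out : String) : Prop := out = unquote_py_alt value
instance (value : String) (out : String) : Decidable (Spec_unquote_py value out) := by
  unfold Spec_unquote_py; infer_instance

-- ===== CLAIM (what is proved, stated in full; the proofs are below) =====
def Claim_equal_unquote_py : Prop :=
  ∀ (value : String), Dom_unquote_py value → Spec_unquote_py value (unquote_py value)

-- ===== LEMMAS AND PROOFS =====

-- direct one-pass unescape: the common reference form both loops are reduced to
def unescapeRef : List Char → List Char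
  | '\\' :: c :: rest => (if c = 'n' then '\n' else c) :: unescapeRef rest
  | c :: rest => c :: unescapeRef rest
  | [] => []

-- pure recursive description of splitting on a single backslash
def split1 : List Char → List (List Char)
  | [] => [[]]
  | c :: l => if c = '\\' then [] :: split1 l
              else (c :: (split1 l).headI) :: (split1 l).tail

-- what B's loop appends after the first segment
def decTail : List (List Char) → List Char
  | [[]] => ['\\']
  | [] :: q :: rest => '\\' :: (q ++ decTail rest)
  | (c :: cs) :: rest => (if c = 'n' then '\n' else c) :: (cs ++ decTail rest)
  | [] => []

theorem split1_ne_nil (l : List Char) : split1 l ≠ [] := by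
  cases l with
  | nil => simp [split1]
  | cons c l => by_cases h : c = '\\' <;> simp [split1, h]

theorem unescapeRef_cons_of_ne (c : Char) (rest : List Char) (hc : c ≠ '\\') :
    unescapeRef (c :: rest) = c :: unescapeRef rest := by
  cases rest <;> simp [unescapeRef, hc]

-- ------- A's loop computes unescapeRef -------

theorem unquoteLoopA_eq_aux (n : Nat) : ∀ (inner : List Char) (i : Nat) (out : List Char),
    inner.length - i ≤ n → unquoteLoopA inner i out = out ++ unescapeRef (inner.drop i) := by
  induction n with
  | zero =>
      intro inner i out hn
      rw [unquoteLoopA, dif_neg (by omega), List.drop_eq_nil_of_le (by omega)]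
      simp [unescapeRef]
  | succ n ih =>
      intro inner i out hn
      by_cases h : i < inner.length
      · rw [unquoteLoopA, dif_pos h]
        by_cases h2 : inner[i] = '\\' ∧ i + 1 < inner.length
        · rw [dif_pos h2, ih inner (i + 2) _ (by omega)]
          have hdrop : inner.drop i = '\\' :: inner[i + 1] :: inner.drop (i + 2) := by
            rw [List.drop_eq_getElem_cons h, List.drop_eq_getElem_cons h2.2]
            simp [h2.1]
          rw [hdrop, unescapeRef]
          simp
        · rw [dif_neg h2, ih inner (i + 1) _ (by omega)]
          have hdrop : inner.drop i = inner[i] :: inner.drop (i + 1) :=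
            List.drop_eq_getElem_cons h
          by_cases hch : inner[i] = '\\'
          · have hnil : inner.drop (i + 1) = [] := by
              refine List.drop_eq_nil_of_le ?_
              rcases Nat.lt_or_ge (i + 1) inner.length with h' | h'
              · exact absurd ⟨hch, h'⟩ h2
              · omega
            rw [hdrop, hnil, hch]
            simp [unescapeRef]
          · rw [hdrop, unescapeRef_cons_of_ne _ _ hch]
            simp
      · rw [unquoteLoopA, dif_neg h, List.drop_eq_nil_of_le (by omega)]
        simp [unescapeRef]

theorem unquoteLoopA_eq (inner : List Char) (i : Nat) (out : List Char) :
    unquoteLoopA inner i out = out ++ unescapeRef (inner.drop i) :=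
  unquoteLoopA_eq_aux (inner.length - i) inner i out le_rfl

-- ------- PySem split on a single backslash is split1 -------

theorem splitOn_go_eq (fuel : Nat) : ∀ (l cur : List Char) (acc : List (List Char)),
    l.length < fuel →
    PySem.Chars.splitOn.go ['\\'] fuel l cur acc
      = acc.reverse ++ (split1 l).modifyHead (cur.reverse ++ ·) := by
  induction fuel with
  | zero => intro l cur acc h; omega
  | succ fuel ih =>
      intro l cur acc h
      cases l with
      | nil =>
          rw [PySem.Chars.splitOn.go]
          · simp [split1]
          · omega
      | cons c rest =>
          rw [PySem.Chars.splitOn.go]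
          by_cases hc : c = '\\'
          · have hpre : List.isPrefixOf ['\\'] (c :: rest) = true := by
              simp [List.isPrefixOf, hc]
            rw [if_pos hpre]
            simp only [List.length_cons] at h
            rw [ih _ _ _ (by simpa using Nat.lt_of_succ_lt_succ h)]
            simp [split1, hc, List.modifyHead]
            cases split1 rest <;> simp
          · have hpre : List.isPrefixOf ['\\'] (c :: rest) = false := by
              simp [List.isPrefixOf]; exact fun hh => hc hh.symm
            rw [if_neg (by simp [hpre])]
            simp only [List.length_cons] at h
            rw [ih _ _ _ (Nat.lt_of_succ_lt_succ h)]
            simp [split1, hc]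
            rcases hne : split1 rest with _ | ⟨p, t⟩
            · exact absurd hne (split1_ne_nil rest)
            · simp [List.modifyHead]

theorem splitOn_eq_split1 (l : List Char) :
    PySem.Chars.splitOn l ['\\'] = split1 l := by
  rw [PySem.Chars.splitOn, splitOn_go_eq (l.length + 1) l [] [] (by omega)]
  simp only [List.reverse_nil, List.nil_append]
  exact congrFun List.modifyHead_id _

-- ------- B's loop flattens to decTail -------

theorem unquoteLoopB_eq_aux (n : Nat) :
    ∀ (parts : List (List Char)) (i : Nat) (res : List (List Char)),
    parts.length - i ≤ n →
    (unquoteLoopB parts i res).flatten = res.flatten ++ decTail (parts.drop i) := by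
  induction n with
  | zero =>
      intro parts i res hn
      rw [unquoteLoopB, dif_neg (by omega), List.drop_eq_nil_of_le (by omega)]
      simp [decTail]
  | succ n ih =>
      intro parts i res hn
      by_cases h : i < parts.length
      · rw [unquoteLoopB, dif_pos h]
        have hdrop : parts.drop i = parts[i] :: parts.drop (i + 1) :=
          List.drop_eq_getElem_cons h
        rcases hp : parts[i] with _ | ⟨c, cs⟩
        · by_cases h2 : i + 1 < parts.length
          · rw [dif_pos h2, ih parts (i + 2) _ (by omega)]
            have hdrop2 : parts.drop i = [] :: parts[i + 1] :: parts.drop (i + 2) := by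
              rw [hdrop, List.drop_eq_getElem_cons h2, hp]
            rw [hdrop2, decTail]
            simp
          · rw [dif_neg h2, ih parts (i + 1) _ (by omega)]
            have hnil : parts.drop (i + 1) = [] := List.drop_eq_nil_of_le (by omega)
            rw [hdrop, hp, hnil, decTail]
            simp [decTail]
        · rw [ih parts (i + 1) _ (by omega), hdrop, hp, decTail]
          simp
      · rw [unquoteLoopB, dif_neg h, List.drop_eq_nil_of_le (by omega)]
        simp [decTail]

theorem unquoteLoopB_eq (parts : List (List Char)) (i : Nat) (res : List (List Char)) :
    (unquoteLoopB parts i res).flatten = res.flatten ++ decTail (parts.drop i) :=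
  unquoteLoopB_eq_aux (parts.length - i) parts i res le_rfl

-- ------- unescapeRef through split1/decTail -------

theorem unescapeRef_eq_dec_aux (n : Nat) : ∀ (l : List Char), l.length ≤ n →
    unescapeRef l = (split1 l).headI ++ decTail (split1 l).tail := by
  induction n with
  | zero =>
      intro l hn
      have : l = [] := List.eq_nil_of_length_eq_zero (by omega)
      subst this
      simp [unescapeRef, split1, decTail]
  | succ n ih =>
      intro l hn
      cases l with
      | nil => simp [unescapeRef, split1, decTail]
      | cons c rest =>
          by_cases hc : c = '\\'
          · subst hc
            cases rest with
            | nil => simp [unescapeRef, split1, decTail]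
            | cons d rest2 =>
                rw [unescapeRef, ih rest2 (by simp at hn; omega)]
                by_cases hd : d = '\\'
                · subst hd
                  rcases hne : split1 rest2 with _ | ⟨p, t⟩
                  · exact absurd hne (split1_ne_nil rest2)
                  · simp [split1, hne, decTail]
                · rcases hne : split1 rest2 with _ | ⟨p, t⟩
                  · exact absurd hne (split1_ne_nil rest2)
                  · simp [split1, hd, hne, decTail]
          · rw [unescapeRef_cons_of_ne _ _ hc, ih rest (by simp at hn; omega)]
            rcases hne : split1 rest with _ | ⟨p, t⟩
            · exact absurd hne (split1_ne_nil rest)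
            · simp [split1, hc, hne]

theorem unescapeRef_eq_dec (l : List Char) :
    unescapeRef l = (split1 l).headI ++ decTail (split1 l).tail :=
  unescapeRef_eq_dec_aux l.length l le_rfl

-- ===== VERDICT (by name: the statement is the Claim_ definition above) =====
theorem unquote_py_spec : Claim_equal_unquote_py := by
  intro value _
  unfold Spec_unquote_py unquote_py unquote_py_alt
  simp only [splitOn_eq_split1, unquoteLoopA_eq, unquoteLoopB_eq, List.drop_zero,
    List.nil_append, List.drop_one, List.flatten_cons, List.flatten_nil, List.append_nil,
    unescapeRef_eq_dec]
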